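-- pv_equiv track=rewrite | github.com/ryzhy1/ITMO_ICT_WebDevelopment_tools_2024-2025 | students/K3339/Skirlyak_Yaroslav/lab2/task_1/main.py | chunk_bounds
-- ===== SOURCE A (Python) =====
-- def chunk_bounds(start: int, end: int, chunks: int):
--     length = end - start + 1
--     step, extra = divmod(length, chunks)
--     bounds, current = [], start
--     for i in range(chunks):
--         size = step + (1 if i < extra else 0)
--         bounds.append((current, current + size - 1))
--         current += size
--     return bounds
-- ===== SOURCE B (Python) =====
-- def chunk_bounds(start: int, end: int, chunks: int):
--     step, extra = divmod(end - start + 1, chunks)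
--     off = lambda i: i * step + min(i, extra)
--     return [(start + off(i), start + off(i + 1) - 1) for i in range(chunks)]
-- ===== Notes on version B (the rewrite author's own statement) =====
-- stated objective: alternative
-- what changed: Replaces the running 'current' pointer accumulated across the loop with a per-index closed form (offset(i) = i*step + min(i, extra)), so each interval is computed independently as (start+offset(i), start+offset(i+1)-1) in a comprehension.
import Mathlib
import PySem

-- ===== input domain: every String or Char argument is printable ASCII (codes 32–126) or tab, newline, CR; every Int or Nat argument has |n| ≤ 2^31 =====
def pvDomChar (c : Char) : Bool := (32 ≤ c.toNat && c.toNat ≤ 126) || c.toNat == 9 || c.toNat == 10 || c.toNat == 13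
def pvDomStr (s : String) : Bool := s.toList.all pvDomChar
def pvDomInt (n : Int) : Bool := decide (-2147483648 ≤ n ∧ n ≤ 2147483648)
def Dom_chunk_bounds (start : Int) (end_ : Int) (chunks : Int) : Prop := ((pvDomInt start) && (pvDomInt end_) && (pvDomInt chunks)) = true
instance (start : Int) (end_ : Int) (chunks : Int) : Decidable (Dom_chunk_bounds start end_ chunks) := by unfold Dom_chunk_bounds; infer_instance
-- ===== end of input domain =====

-- B replaces A's running 'current' accumulator with an independent closed-form boundary per index (alternative decomposition, same cost).

-- ===== PORT A =====
-- literal transliteration of A: divmod, then a loop carrying (bounds, current)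
def chunk_bounds (start : Int) (end_ : Int) (chunks : Int) : List (Int × Int) :=
  let length := end_ - start + 1
  match PySem.Int.divmod? length chunks with
  | none => []   -- Python raises ZeroDivisionError here; excluded by Pre_
  | some (step, extra) =>
    ((PySem.List.pyRange 0 chunks 1).foldl
      (fun st i =>
        let size := step + (if i < extra then (1:Int) else 0)
        (st.1 ++ [(st.2, st.2 + size - 1)], st.2 + size))
      ([], start)).1

-- ===== PORT B =====
def cbOff (step extra i : Int) : Int := i * step + min i extra

def chunk_bounds_alt (start : Int) (end_ : Int) (chunks : Int) : List (Int × Int) :=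
  match PySem.Int.divmod? (end_ - start + 1) chunks with
  | none => []   -- Python raises ZeroDivisionError here; excluded by Pre_
  | some (step, extra) =>
    (PySem.List.pyRange 0 chunks 1).map
      (fun i => (start + cbOff step extra i, start + cbOff step extra (i + 1) - 1))

-- ===== PRECONDITION & SPEC =====
-- Python A raises ZeroDivisionError exactly when chunks == 0.
def Pre_chunk_bounds (start : Int) (end_ : Int) (chunks : Int) : Prop := chunks ≠ 0
instance (start : Int) (end_ : Int) (chunks : Int) : Decidable (Pre_chunk_bounds start end_ chunks) := by unfold Pre_chunk_bounds; infer_instance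

def pvWitness_chunk_bounds : Int × Int × Int := (0, 9, 3)

def Spec_chunk_bounds (start : Int) (end_ : Int) (chunks : Int) (out : List (Int × Int)) : Prop := out = chunk_bounds_alt start end_ chunks
instance (start : Int) (end_ : Int) (chunks : Int) (out : List (Int × Int)) : Decidable (Spec_chunk_bounds start end_ chunks out) := by unfold Spec_chunk_bounds; infer_instance

-- ===== CLAIM (what is proved, stated in full; the proofs are below) =====
def Claim_equal_chunk_bounds : Prop := ∀ (start : Int) (end_ : Int) (chunks : Int), Dom_chunk_bounds start end_ chunks → Pre_chunk_bounds start end_ chunks → Spec_chunk_bounds start end_ chunks (chunk_bounds start end_ chunks)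

-- ===== LEMMAS AND PROOFS =====

-- Loop invariant: after processing range(0, n), A's state is (B's first n intervals, start + offset(n)).
lemma chunk_loop (step extra start : Int) (hextra : 0 ≤ extra) (n : Nat) :
    (PySem.List.pyRange 0 (n : Int) 1).foldl
      (fun st i =>
        let size := step + (if i < extra then (1:Int) else 0)
        (st.1 ++ [(st.2, st.2 + size - 1)], st.2 + size))
      ([], start)
    = ((PySem.List.pyRange 0 (n : Int) 1).map
        (fun i => (start + cbOff step extra i, start + cbOff step extra (i + 1) - 1)),
       start + cbOff step extra n) := by
  induction n with
  | zero =>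
    simp [PySem.List.pyRange_one_eq_nil, cbOff]
    omega
  | succ n ih =>
    have h1 : (0:Int) ≤ (n:Int) := by exact_mod_cast Nat.zero_le n
    have hr : PySem.List.pyRange 0 ((n+1 : Nat) : Int) 1
        = PySem.List.pyRange 0 (n : Int) 1 ++ [(n : Int)] := by
      push_cast
      exact PySem.List.pyRange_one_succ_right h1
    have key : ∀ m : Int, cbOff step extra m + (step + if m < extra then (1:Int) else 0)
        = cbOff step extra (m + 1) := by
      intro m
      unfold cbOff
      have h2 : min m extra + (if m < extra then (1:Int) else 0) = min (m + 1) extra := by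
        split_ifs <;> omega
      calc m * step + min m extra + (step + if m < extra then (1:Int) else 0)
          = (m + 1) * step + (min m extra + (if m < extra then (1:Int) else 0)) := by ring
        _ = (m + 1) * step + min (m + 1) extra := by rw [h2]
    rw [hr, List.foldl_append, ih, List.map_append]
    simp only [List.foldl_cons, List.foldl_nil, List.map_cons, List.map_nil]
    have eA : start + cbOff step extra (n:Int) + (step + if (n:Int) < extra then (1:Int) else 0) - 1
        = start + cbOff step extra ((n:Int) + 1) - 1 := by rw [← key]; ring
    have eB : start + cbOff step extra (n:Int) + (step + if (n:Int) < extra then (1:Int) else 0)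
        = start + cbOff step extra (((n+1 : Nat)) : Int) := by push_cast; rw [← key]; ring
    rw [eA, eB]

-- ===== VERDICT (by name: the statement is the Claim_ definition above) =====
theorem chunk_bounds_spec : Claim_equal_chunk_bounds := by
  intro start end_ chunks _ hpre
  unfold Spec_chunk_bounds chunk_bounds chunk_bounds_alt
  have hpre' : chunks ≠ 0 := hpre
  have hd : PySem.Int.divmod? (end_ - start + 1) chunks
      = some (PySem.Int.floordiv (end_ - start + 1) chunks,
              PySem.Int.mod (end_ - start + 1) chunks) := by
    simp [PySem.Int.divmod?, PySem.Int.floordiv, PySem.Int.mod, hpre']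
  dsimp only
  rw [hd]
  dsimp only
  rcases lt_trichotomy chunks 0 with hlt | heq | hgt
  · rw [PySem.List.pyRange_one_eq_nil (le_of_lt hlt)]
    simp
  · exact absurd heq hpre'
  · have hc : chunks = ((chunks.toNat : Nat) : Int) := by omega
    rw [hc] at hgt ⊢
    have hmod : 0 ≤ PySem.Int.mod (end_ - start + 1) ((chunks.toNat : Nat) : Int) := by
      rw [PySem.Int.mod_eq_emod_of_pos hgt]
      exact Int.emod_nonneg _ (by omega)
    rw [chunk_loop _ _ _ hmod chunks.toNat]
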